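-- pv_equiv track=rewrite | github.com/groboclown/music-uploader | convertmusic/tools/ffmpeg_bin/ffprobe.py | __format_split
-- ===== SOURCE A (Python) =====
-- def __format_split(line):
--     whitespace = True
--     ret = []
--     buf = ''
--     for c in line:
--         if whitespace:
--             if not c.isspace():
--                 whitespace = False
--                 buf = c
--         else:
--             if len(ret) < 2 and c.isspace():
--                 ret.append(buf.strip())
--                 buf = ''
--             else:
--                 buf += c
--     if len(buf) > 0:
--         ret.append(buf.strip())
--     return ret
-- ===== SOURCE B (Python) =====
-- def _partition_ws(s):
--     # split s at its first whitespace char: (before, found?, after)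
--     for i, c in enumerate(s):
--         if c.isspace():
--             return s[:i], True, s[i + 1:]
--     return s, False, ''
--
--
-- def __format_split(line):
--     s = line.lstrip()
--     if not s:
--         return []
--     f1, found1, rest1 = _partition_ws(s)
--     if not found1:
--         return [s]
--     f2, found2, tail = _partition_ws(rest1)
--     if not found2:
--         return [f1, rest1] if rest1 else [f1]
--     return [f1, f2] + ([tail.strip()] if tail else [])
-- ===== Notes on version B (the rewrite author's own statement) =====
-- stated objective: simpler
-- what changed: Replaces A's character-streaming two-phase state machine (whitespace flag, ret, buf accumulator) by a direct decomposition: lstrip the line, partition at the first whitespace, partition the remainder at its first whitespace, and strip the tail.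
import Mathlib
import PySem

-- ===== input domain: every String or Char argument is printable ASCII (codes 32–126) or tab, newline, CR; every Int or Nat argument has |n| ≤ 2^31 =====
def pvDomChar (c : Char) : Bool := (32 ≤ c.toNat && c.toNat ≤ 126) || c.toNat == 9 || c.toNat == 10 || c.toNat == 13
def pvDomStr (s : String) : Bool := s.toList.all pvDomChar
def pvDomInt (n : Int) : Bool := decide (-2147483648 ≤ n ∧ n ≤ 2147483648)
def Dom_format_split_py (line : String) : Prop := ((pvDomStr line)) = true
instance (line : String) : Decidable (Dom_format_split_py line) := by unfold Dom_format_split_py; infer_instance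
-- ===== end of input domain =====

-- B replaces A's two-phase streaming state machine by a direct decomposition: lstrip, then
-- split at the first two whitespace positions and strip the remainder (objective: simpler).

-- ===== PORT A =====
-- one step of A's for-loop, state = (whitespace, ret, buf)
def fspStep (st : Bool × List (List Char) × List Char) (c : Char) :
    Bool × List (List Char) × List Char :=
  if st.1 then
    if ¬ (PySem.Chars.isspace c = true) then (false, st.2.1, [c]) else st
  else
    if st.2.1.length < 2 ∧ PySem.Chars.isspace c = true then
      (false, st.2.1 ++ [PySem.Chars.strip st.2.2], [])
    else (false, st.2.1, st.2.2 ++ [c])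

def format_split_py (line : String) : List String :=
  let st := line.toList.foldl fspStep (true, [], [])
  let ret := if st.2.2.length > 0 then st.2.1 ++ [PySem.Chars.strip st.2.2] else st.2.1
  ret.map String.ofList

-- ===== PORT B =====
-- _partition_ws: split at the first whitespace char: (before, found?, after)
def partWs : List Char → List Char × Bool × List Char
  | [] => ([], false, [])
  | c :: cs =>
    if PySem.Chars.isspace c then ([], true, cs)
    else
      let r := partWs cs
      (c :: r.1, r.2.1, r.2.2)

def format_split_py_alt (line : String) : List String :=
  let s := PySem.Chars.lstrip line.toList
  if s = [] then []
  else
    let p1 := partWs s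
    if p1.2.1 = false then [String.ofList s]
    else
      let p2 := partWs p1.2.2
      if p2.2.1 = false then
        if p1.2.2 = [] then [String.ofList p1.1] else [String.ofList p1.1, String.ofList p1.2.2]
      else
        [String.ofList p1.1, String.ofList p2.1] ++
          (if p2.2.2 = [] then [] else [String.ofList (PySem.Chars.strip p2.2.2)])

-- ===== PRECONDITION & SPEC =====
def Spec_format_split_py (line : String) (out : List String) : Prop := out = format_split_py_alt line
instance (line : String) (out : List String) : Decidable (Spec_format_split_py line out) := by unfold Spec_format_split_py; infer_instance

-- ===== CLAIM (what is proved, stated in full; the proofs are below) =====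
def Claim_equal_format_split_py : Prop := ∀ (line : String), Dom_format_split_py line → Spec_format_split_py line (format_split_py line)

-- ===== LEMMAS AND PROOFS =====

-- A's finalization step
def fspFin (st : Bool × List (List Char) × List Char) : List (List Char) :=
  if st.2.2.length > 0 then st.2.1 ++ [PySem.Chars.strip st.2.2] else st.2.1

-- partWs found nothing ⟹ the whole input is the token
theorem partWs_not_found : ∀ l : List Char, (partWs l).2.1 = false →
    partWs l = (l, false, []) := by
  intro l
  induction l with
  | nil => intro _; rfl
  | cons c cs ih =>
    simp only [partWs]
    by_cases hc : PySem.Chars.isspace c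
    · simp [hc]
    · simp only [if_neg hc]
      intro h
      simp_all

-- partWs found a space ⟹ the input decomposes as token ++ space ++ rest, token whitespace-free
theorem partWs_found : ∀ l : List Char, (partWs l).2.1 = true →
    (∃ c, PySem.Chars.isspace c = true ∧ l = (partWs l).1 ++ c :: (partWs l).2.2) ∧
    (∀ x ∈ (partWs l).1, PySem.Chars.isspace x = false) := by
  intro l
  induction l with
  | nil => intro h; simp [partWs] at h
  | cons c cs ih =>
    simp only [partWs]
    by_cases hc : PySem.Chars.isspace c
    · intro _; exact ⟨⟨c, hc, by simp [hc]⟩, by simp [hc]⟩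
    · simp only [if_neg hc]
      intro h
      obtain ⟨⟨d, hd, hdec⟩, hfree⟩ := ih h
      refine ⟨⟨d, hd, by simpa using hdec⟩, ?_⟩
      intro x hx
      rcases List.mem_cons.mp hx with rfl | hx
      · simpa using hc
      · exact hfree x hx

-- no whitespace ⟹ strip is the identity
theorem strip_no_ws (cs : List Char) (h : ∀ x ∈ cs, PySem.Chars.isspace x = false) :
    PySem.Chars.strip cs = cs := by
  simp only [PySem.Chars.strip, PySem.Chars.lstrip, PySem.Chars.rstrip]
  have h1 : List.dropWhile PySem.Chars.isspace cs = cs := by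
    rw [List.dropWhile_eq_self_iff]
    intro hne
    simp [h _ (List.getElem_mem _)]
  rw [h1, List.dropWhile_eq_self_iff.mpr, List.reverse_reverse]
  intro hne
  simp only [List.getElem_reverse, Bool.not_eq_true, Nat.sub_zero]
  exact h _ (List.getElem_mem _)

-- a whitespace member forces partWs to report a find
theorem partWs_mem_ws : ∀ (l : List Char) (x : Char), x ∈ l →
    PySem.Chars.isspace x = true → (partWs l).2.1 = true := by
  intro l
  induction l with
  | nil => intro x hx; simp at hx
  | cons c cs ih =>
    intro x hx hxs
    simp only [partWs]
    by_cases hc : PySem.Chars.isspace c = true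
    · simp [hc]
    · rcases List.mem_cons.mp hx with rfl | hx'
      · exact absurd hxs hc
      · simpa [hc] using ih x hx' hxs

-- whitespace-skipping phase of A's loop
theorem fsp_skip : ∀ (l : List Char) (ret : List (List Char)),
    fspFin (l.foldl fspStep (true, ret, [])) =
      match l.dropWhile PySem.Chars.isspace with
      | [] => ret
      | c :: cs => fspFin (cs.foldl fspStep (false, ret, [c])) := by
  intro l
  induction l with
  | nil => intro ret; rfl
  | cons c cs ih =>
    intro ret
    by_cases hc : PySem.Chars.isspace c
    · simpa [List.foldl_cons, fspStep, hc] using ih ret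
    · simp [List.foldl_cons, fspStep, hc]

-- token-collecting phase while fewer than two fields are done
theorem fsp_phase : ∀ (l : List Char) (buf : List Char) (ret : List (List Char)),
    ret.length < 2 →
    fspFin (l.foldl fspStep (false, ret, buf)) =
      (if (partWs l).2.1 = false then
        (if buf ++ (partWs l).1 = [] then ret
         else ret ++ [PySem.Chars.strip (buf ++ (partWs l).1)])
       else
        fspFin ((partWs l).2.2.foldl fspStep
          (false, ret ++ [PySem.Chars.strip (buf ++ (partWs l).1)], []))) := by
  intro l
  induction l with
  | nil =>
    intro buf ret _
    simp only [partWs, List.foldl_nil, fspFin, List.append_nil]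
    by_cases hb : buf = [] <;> simp [hb, List.length_pos_iff]
  | cons c cs ih =>
    intro buf ret hlen
    simp only [List.foldl_cons, fspStep, Bool.false_eq_true, if_false, partWs]
    by_cases hc : PySem.Chars.isspace c = true
    · simp [hc, hlen]
    · have hc' : PySem.Chars.isspace c = false := by simpa using hc
      simp only [hc', Bool.false_eq_true, and_false, if_false]
      rw [ih (buf ++ [c]) ret hlen]
      simp [List.append_assoc]

-- once two fields are done everything goes into the buffer
theorem fsp_tail : ∀ (l : List Char) (buf : List Char) (ret : List (List Char)),
    ¬ ret.length < 2 →
    fspFin (l.foldl fspStep (false, ret, buf)) =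
      (if buf ++ l = [] then ret else ret ++ [PySem.Chars.strip (buf ++ l)]) := by
  intro l
  induction l with
  | nil =>
    intro buf ret _
    simp only [List.foldl_nil, fspFin, List.append_nil]
    by_cases hb : buf = [] <;> simp [hb, List.length_pos_iff]
  | cons c cs ih =>
    intro buf ret hlen
    simp only [List.foldl_cons, fspStep, Bool.false_eq_true, if_false, hlen, false_and]
    rw [ih (buf ++ [c]) ret hlen]
    simp [List.append_assoc]

-- ===== VERDICT (by name: the statement is the Claim_ definition above) =====
theorem format_split_py_spec : Claim_equal_format_split_py := by
  intro line _
  unfold Spec_format_split_py format_split_py format_split_py_alt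
  show (fspFin (line.toList.foldl fspStep (true, [], []))).map String.ofList = _
  rw [fsp_skip]
  simp only [PySem.Chars.lstrip]
  cases hdrop : line.toList.dropWhile PySem.Chars.isspace with
  | nil => simp
  | cons c cs =>
    have hc : PySem.Chars.isspace c = false := by
      have := List.head_dropWhile_not (p := PySem.Chars.isspace) (l := line.toList)
      simp [hdrop] at this
      simpa using this
    have hmatch : (match c :: cs with
        | [] => ([] : List (List Char))
        | c :: cs => fspFin (List.foldl fspStep (false, [], [c]) cs)) =
        fspFin (List.foldl fspStep (false, [], [c]) cs) := rfl
    rw [hmatch]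
    -- A: we are in the token phase with ret = [], buf = [c]
    rw [fsp_phase cs [c] [] (by simp)]
    have hpart : partWs (c :: cs) = (c :: (partWs cs).1, (partWs cs).2.1, (partWs cs).2.2) := by
      simp [partWs, hc]
    by_cases h1 : (partWs cs).2.1 = false
    · -- no whitespace after the first token: result is the whole stripped line
      have hid := partWs_not_found cs h1
      have hfree : ∀ x ∈ c :: cs, PySem.Chars.isspace x = false := by
        intro x hx
        rcases List.mem_cons.mp hx with rfl | hx
        · exact hc
        · by_contra hxs
          have hx2 : PySem.Chars.isspace x = true := by simpa using hxs
          simp [partWs_mem_ws cs x hx hx2] at h1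
      rw [hpart, hid]
      simp [strip_no_ws (c :: cs) hfree]
    · have h1' : (partWs cs).2.1 = true := by simpa using h1
      obtain ⟨⟨d, hd, hdec⟩, hfree1⟩ := partWs_found cs h1'
      have hf1 : PySem.Chars.strip (c :: (partWs cs).1) = c :: (partWs cs).1 := by
        apply strip_no_ws
        intro x hx
        rcases List.mem_cons.mp hx with rfl | hx
        · exact hc
        · exact hfree1 x hx
      rw [hpart]
      simp only [h1', Bool.true_eq_false, if_false, List.nil_append]
      -- second application: one field done
      rw [fsp_phase (partWs cs).2.2 [] [PySem.Chars.strip ([c] ++ (partWs cs).1)] (by simp)]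
      by_cases h2 : (partWs (partWs cs).2.2).2.1 = false
      · have hid2 := partWs_not_found _ h2
        have hfree2 : ∀ x ∈ (partWs cs).2.2, PySem.Chars.isspace x = false := by
          intro x hx
          by_contra hxs
          have hx2 : PySem.Chars.isspace x = true := by simpa using hxs
          simp [partWs_mem_ws _ x hx hx2] at h2
        rw [hid2]
        by_cases hr : (partWs cs).2.2 = []
        · simp [hr, hf1]
        · simp [hr, hf1, strip_no_ws _ hfree2]
      · have h2' : (partWs (partWs cs).2.2).2.1 = true := by simpa using h2
        obtain ⟨⟨e, he, hedec⟩, hfree2⟩ := partWs_found _ h2'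
        have hf2 : PySem.Chars.strip (partWs (partWs cs).2.2).1 =
            (partWs (partWs cs).2.2).1 := strip_no_ws _ hfree2
        simp only [h2', Bool.true_eq_false, if_false, List.nil_append,
          List.singleton_append, hf1]
        rw [fsp_tail _ [] _ (by simp)]
        simp only [List.nil_append, hf2]
        by_cases ht : (partWs (partWs cs).2.2).2.2 = [] <;> simp [ht]
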